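-- pv_equiv track=rewrite | github.com/starostin13/Care | generate_hemisphere.py | hex_ring
-- ===== SOURCE A (Python) =====
-- HEX_DIRECTIONS = [
--     (1, 0), (1, -1), (0, -1),
--     (-1, 0), (-1, 1), (0, 1)
-- ]
--
-- def hex_ring(cq, cr, radius):
--     if radius == 0:
--         return [(cq, cr)]
--     results = []
--     q = cq + HEX_DIRECTIONS[4][0] * radius
--     r = cr + HEX_DIRECTIONS[4][1] * radius
--     for i in range(6):
--         for _ in range(radius):
--             results.append((q, r))
--             dq, dr = HEX_DIRECTIONS[i]
--             q += dq
--             r += dr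
--     return results
-- ===== SOURCE B (Python) =====
-- HEX_CORNERS = [
--     (-1, 1), (0, 1), (1, 0),
--     (1, -1), (0, -1), (-1, 0)
-- ]
--
-- def hex_ring(cq, cr, radius):
--     if radius == 0:
--         return [(cq, cr)]
--     # 1st stage: the six corner points of the ring, each in closed form.
--     pts = [(cq + x * radius, cr + y * radius) for x, y in HEX_CORNERS]
--     # 2nd stage: linearly interpolate each edge between consecutive corners.
--     out = []
--     for i in range(6):
--         q0, r0 = pts[i]
--         q1, r1 = pts[(i + 1) % 6]
--         dq = (q1 - q0) // radius
--         dr = (r1 - r0) // radius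
--         for j in range(radius):
--             out.append((q0 + dq * j, r0 + dr * j))
--     return out
-- ===== Notes on version B (the rewrite author's own statement) =====
-- stated objective: alternative
-- what changed: B drops the HEX_DIRECTIONS walk entirely: it first builds the six ring corners in closed form from a corner table, then linearly interpolates each edge between consecutive corners, deriving the step as the corner difference divided by the radius.
import Mathlib
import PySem

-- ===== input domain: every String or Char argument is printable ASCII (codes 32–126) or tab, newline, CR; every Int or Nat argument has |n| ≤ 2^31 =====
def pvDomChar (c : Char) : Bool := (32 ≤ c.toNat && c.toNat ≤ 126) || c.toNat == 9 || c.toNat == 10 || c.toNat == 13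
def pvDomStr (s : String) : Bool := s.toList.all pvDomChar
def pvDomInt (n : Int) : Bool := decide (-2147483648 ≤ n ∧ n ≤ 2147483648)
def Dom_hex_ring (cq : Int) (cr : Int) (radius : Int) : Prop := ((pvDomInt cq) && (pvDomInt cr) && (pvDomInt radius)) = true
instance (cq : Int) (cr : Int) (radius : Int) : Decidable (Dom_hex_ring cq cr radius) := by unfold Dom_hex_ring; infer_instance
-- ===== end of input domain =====

-- B replaces A's direction-table walk with a two-stage construction: the six ring corners
-- in closed form, then linear interpolation of each edge between consecutive corners.

-- ===== PORT A =====
def HEX_DIRECTIONS : List (Int × Int) := [(1, 0), (1, -1), (0, -1), (-1, 0), (-1, 1), (0, 1)]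

-- A: walk a single running point (q, r), appending then stepping, 6 sides × radius steps.
def hex_ring (cq : Int) (cr : Int) (radius : Int) : List (Int × Int) :=
  if radius = 0 then [(cq, cr)]
  else
    let d4 := PySem.List.pyGetD HEX_DIRECTIONS 4 (0, 0)
    let st := (PySem.List.pyRange 0 6 1).foldl
      (fun (st : List (Int × Int) × Int × Int) i =>
        (PySem.List.pyRange 0 radius 1).foldl
          (fun st _ =>
            let d := PySem.List.pyGetD HEX_DIRECTIONS i (0, 0)
            (st.1 ++ [(st.2.1, st.2.2)], st.2.1 + d.1, st.2.2 + d.2)) st)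
      ([], cq + d4.1 * radius, cr + d4.2 * radius)
    st.1

-- ===== PORT B =====
def HEX_CORNERS : List (Int × Int) := [(-1, 1), (0, 1), (1, 0), (1, -1), (0, -1), (-1, 0)]

-- B: build the six scaled corner points, then interpolate each edge between
-- consecutive corners with step (next - corner) // radius.
def hex_ring_alt (cq : Int) (cr : Int) (radius : Int) : List (Int × Int) :=
  if radius = 0 then [(cq, cr)]
  else
    let pts := HEX_CORNERS.map (fun c => (cq + c.1 * radius, cr + c.2 * radius))
    (PySem.List.pyRange 0 6 1).foldl
      (fun (out : List (Int × Int)) i =>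
        let p := PySem.List.pyGetD pts i ((0 : Int), (0 : Int))
        let p' := PySem.List.pyGetD pts (PySem.Int.mod (i + 1) 6) ((0 : Int), (0 : Int))
        let dq := PySem.Int.floordiv (p'.1 - p.1) radius
        let dr := PySem.Int.floordiv (p'.2 - p.2) radius
        out ++ (PySem.List.pyRange 0 radius 1).map (fun j => (p.1 + dq * j, p.2 + dr * j)))
      []

-- ===== PRECONDITION & SPEC =====
def Spec_hex_ring (cq : Int) (cr : Int) (radius : Int) (out : List (Int × Int)) : Prop := out = hex_ring_alt cq cr radius
instance (cq : Int) (cr : Int) (radius : Int) (out : List (Int × Int)) : Decidable (Spec_hex_ring cq cr radius out) := by unfold Spec_hex_ring; infer_instance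

-- ===== CLAIM (what is proved, stated in full; the proofs are below) =====
def Claim_equal_hex_ring : Prop := ∀ (cq : Int) (cr : Int) (radius : Int), Dom_hex_ring cq cr radius → Spec_hex_ring cq cr radius (hex_ring cq cr radius)

-- ===== LEMMAS AND PROOFS =====

-- A's inner walk over range(0, n) equals a direct-offset edge, for every Nat step count n.
theorem inner_walk (d : Int × Int) (n : Nat) (res : List (Int × Int)) (q r : Int) :
    (PySem.List.pyRange 0 (n : Int) 1).foldl
      (fun (st : List (Int × Int) × Int × Int) _ =>
        (st.1 ++ [(st.2.1, st.2.2)], st.2.1 + d.1, st.2.2 + d.2)) (res, q, r)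
    = (res ++ (PySem.List.pyRange 0 (n : Int) 1).map (fun j => (q + d.1 * j, r + d.2 * j)),
       q + d.1 * n, r + d.2 * n) := by
  induction n generalizing res q r with
  | zero => simp [PySem.List.pyRange_one_eq_nil]
  | succ k ih =>
      rw [show ((k + 1 : Nat) : Int) = (k : Int) + 1 by push_cast; ring,
          PySem.List.pyRange_one_succ_right (by exact_mod_cast Nat.zero_le k)]
      simp only [List.foldl_append, List.map_append, List.foldl_cons, List.foldl_nil,
        List.map_cons, List.map_nil, ih]
      rw [List.append_assoc]
      simp only [Prod.mk.injEq]
      exact ⟨trivial, by ring, by ring⟩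

-- negative radius: both ranges are empty, both programs return [].
theorem neg_radius (cq cr radius : Int) (h0 : radius ≠ 0) (hneg : radius < 0) :
    hex_ring cq cr radius = hex_ring_alt cq cr radius := by
  simp [hex_ring, hex_ring_alt, h0, PySem.List.pyRange_one_eq_nil hneg.le,
    PySem.List.pyRange_one, List.range_succ]

-- ===== VERDICT (by name: the statement is the Claim_ definition above) =====
theorem hex_ring_spec : Claim_equal_hex_ring := by
  intro cq cr radius _
  show hex_ring cq cr radius = hex_ring_alt cq cr radius
  by_cases h0 : radius = 0
  · simp [hex_ring, hex_ring_alt, h0]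
  rcases lt_or_gt_of_ne h0 with hneg | hpos
  · exact neg_radius cq cr radius h0 hneg
  · obtain ⟨n, rfl⟩ : ∃ n : Nat, radius = (n : Int) :=
      ⟨radius.toNat, (Int.toNat_of_nonneg hpos.le).symm⟩
    have hn : 0 < (n : Int) := hpos
    simp only [hex_ring, hex_ring_alt, if_neg h0]
    rw [show PySem.List.pyRange 0 6 1 = [0, 1, 2, 3, 4, 5] from by decide]
    simp only [List.foldl_cons, List.foldl_nil, inner_walk]
    rw [show PySem.Int.mod (0 + 1) 6 = 1 from by decide,
        show PySem.Int.mod (1 + 1) 6 = 2 from by decide,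
        show PySem.Int.mod (2 + 1) 6 = 3 from by decide,
        show PySem.Int.mod (3 + 1) 6 = 4 from by decide,
        show PySem.Int.mod (4 + 1) 6 = 5 from by decide,
        show PySem.Int.mod (5 + 1) 6 = 0 from by decide]
    simp only [HEX_DIRECTIONS, HEX_CORNERS, List.map_cons, List.map_nil]
    norm_num [PySem.List.pyGetD,
      show (0:Int).toNat = 0 from rfl, show (1:Int).toNat = 1 from rfl,
      show (2:Int).toNat = 2 from rfl, show (3:Int).toNat = 3 from rfl,
      show (4:Int).toNat = 4 from rfl, show (5:Int).toNat = 5 from rfl]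
    have e0 : ∀ a : Int, PySem.Int.floordiv a (n : Int) = a / (n : Int) :=
      fun a => PySem.Int.floordiv_eq_ediv_of_pos hn
    have e1 : (n : Int) / (n : Int) = 1 := Int.ediv_self hn.ne'
    have e2 : (-(n : Int)) / (n : Int) = -1 := by
      rw [Int.neg_ediv_of_dvd (dvd_refl _), e1]
    norm_num [e0, e1, e2, List.nil_append, List.append_assoc]
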